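-- pv_equiv track=rewrite | github.com/mortyc126-debug/SHA | alg_attack/scf_newton_kernel.py | gf2_solve
-- ===== SOURCE A (Python) =====
-- def gf2_solve(M, target):
--     """Solve M·x = target over GF(2). M is n×m, target is n-bit.
--     Returns (solution, rank) or (None, rank) if no solution."""
--     n = len(M)
--     m = len(M[0]) if M else 0
--     # Augmented matrix [M | target]
--     aug = [list(M[i]) + [(target>>i)&1] for i in range(n)]
--
--     pivots = []
--     ri = 0
--     for col in range(m):
--         pv = -1
--         for r in range(ri, n):
--             if aug[r][col]: pv=r; break
--         if pv == -1: continue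
--         aug[ri], aug[pv] = aug[pv], aug[ri]
--         for r in range(n):
--             if r != ri and aug[r][col]:
--                 for c in range(m+1): aug[r][c] ^= aug[ri][c]
--         pivots.append(col)
--         ri += 1
--
--     rank = len(pivots)
--
--     # Check consistency
--     for r in range(rank, n):
--         if aug[r][m]:
--             return None, rank  # Inconsistent
--
--     # Extract solution (set free vars to 0)
--     sol = [0] * m
--     for i, pc in enumerate(pivots):
--         sol[pc] = aug[i][m]
--
--     return sol, rank
-- ===== SOURCE B (Python) =====
-- def gf2_solve(M, target):
--     """Solve M.x = target over GF(2). Instead of rewriting an augmented matrix,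
--     keep each working row as a bitmask over the ORIGINAL rows (its XOR combination)
--     and materialize any needed entry on demand by folding XOR over the mask's bits."""
--     n = len(M)
--     m = len(M[0]) if M else 0
--     aug = [row + [(target >> i) & 1] for i, row in enumerate(M)]
--
--     def entry(mask, c):
--         v, i = 0, 0
--         while mask:
--             if mask & 1:
--                 v ^= aug[i][c]
--             mask >>= 1
--             i += 1
--         return v
--
--     comb = [1 << i for i in range(n)]   # working row r = XOR of original rows in comb[r]
--     pivots = []
--     ri = 0
--     for col in range(m):
--         vals = [entry(mask, col) for mask in comb]
--         pv = next((r for r in range(ri, n) if vals[r]), -1)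
--         if pv < 0:
--             continue
--         comb[ri], comb[pv] = comb[pv], comb[ri]
--         vals[ri], vals[pv] = vals[pv], vals[ri]
--         piv = comb[ri]
--         for r in range(n):
--             if r != ri and vals[r]:
--                 comb[r] ^= piv
--         pivots.append(col)
--         ri += 1
--
--     rank = len(pivots)
--     if any(entry(comb[r], m) for r in range(rank, n)):
--         return None, rank
--     sol = [0] * m
--     for i, pc in enumerate(pivots):
--         sol[pc] = entry(comb[i], m)
--     return sol, rank
-- ===== Notes on version B (the rewrite author's own statement) =====
-- stated objective: alternative
-- what changed: B never rewrites the augmented matrix: it keeps each working row as a bitmask over the original rows (the recorded GF(2) row-operation combination), eliminates a row by XORing two masks, and materializes any entry it needs on demand by XOR-folding the original entries under the mask; Pre_ excludes matrices with a row shorter than the first row, on which A normally raises IndexError and only returns via its early inconsistency exit.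
-- outside the precondition, e.g. on gf2_solve([[0, 0, 0], [1]], 7): A returns (None, 1), B raises IndexError
import Mathlib
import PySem

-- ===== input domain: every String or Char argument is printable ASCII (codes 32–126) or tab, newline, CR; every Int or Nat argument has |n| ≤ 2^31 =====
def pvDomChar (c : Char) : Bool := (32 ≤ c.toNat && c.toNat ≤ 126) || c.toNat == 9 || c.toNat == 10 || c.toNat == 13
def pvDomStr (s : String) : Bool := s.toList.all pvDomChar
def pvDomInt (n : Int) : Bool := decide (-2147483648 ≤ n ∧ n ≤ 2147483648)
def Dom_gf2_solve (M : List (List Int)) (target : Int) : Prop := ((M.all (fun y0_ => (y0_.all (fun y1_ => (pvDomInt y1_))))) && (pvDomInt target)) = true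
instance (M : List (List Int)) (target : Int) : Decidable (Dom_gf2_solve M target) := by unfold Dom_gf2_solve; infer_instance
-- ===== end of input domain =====

-- B replaces the mutated augmented matrix by per-row bitmasks over the ORIGINAL rows
-- (the recorded GF(2) row-operation combination) with entries recomputed on demand
-- (objective: alternative). Return-value equivalence on Pre_.

-- ===== PORT A =====
-- (target >> i) & 1
def pyBit (t : Int) (i : Nat) : Int := PySem.Int.band (t >>> i) 1

-- 'for c in range(m+1): aug[r][c] ^= aug[ri][c]' (q is row ri, r the updated row)
def pyXorRow (m : Nat) (q r : List Int) : List Int :=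
  (List.range (m+1)).foldl (fun row c => row.set c (PySem.Int.bxor (row.getD c 0) (q.getD c 0))) r

-- 'for r in range(n): if r != ri and aug[r][col]: …'
def elimA (n m ri col : Nat) (aug : List (List Int)) : List (List Int) :=
  (List.range n).foldl (fun aug r =>
    if r ≠ ri ∧ (aug.getD r []).getD col 0 ≠ 0 then
      aug.set r (pyXorRow m (aug.getD ri []) (aug.getD r []))
    else aug) aug

-- one iteration of 'for col in range(m)'
def colStepA (n m : Nat) (st : List (List Int) × Nat × List Nat) (col : Nat) :
    List (List Int) × Nat × List Nat :=
  match (List.range' st.2.1 (n - st.2.1)).find? (fun r => decide ((st.1.getD r []).getD col 0 ≠ 0)) with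
  | none => st
  | some pv =>
    let aug := (st.1.set st.2.1 (st.1.getD pv [])).set pv (st.1.getD st.2.1 [])
    (elimA n m st.2.1 col aug, st.2.1 + 1, st.2.2 ++ [col])

def gf2_solve (M : List (List Int)) (target : Int) : Option (List Int) × Int :=
  let n := M.length
  let m := match M with | [] => 0 | r :: _ => r.length
  let aug0 := (List.range n).map (fun i => M.getD i [] ++ [pyBit target i])
  let st := (List.range m).foldl (colStepA n m) (aug0, 0, [])
  let rank := st.2.2.length
  if (List.range' rank (n - rank)).any (fun r => decide ((st.1.getD r []).getD m 0 ≠ 0)) then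
    (none, (rank : Int))
  else
    (some ((PySem.List.enumerate st.2.2 0).foldl
        (fun sol p => sol.set p.2 ((st.1.getD p.1.toNat []).getD m 0))
        (List.replicate m (0 : Int))), (rank : Int))

-- ===== PORT B =====
-- 'def entry(mask, c): v,i=0,0; while mask: if mask&1: v ^= aug[i][c]; mask>>=1; i+=1; return v'
def entryAux (aug : List (List Int)) (mask i c : Nat) (v : Int) : Int :=
  if h : mask = 0 then v
  else entryAux aug (mask >>> 1) (i+1) c
    (if mask &&& 1 = 1 then PySem.Int.bxor v ((aug.getD i []).getD c 0) else v)
  termination_by mask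
  decreasing_by simp [Nat.shiftRight_one]; omega

def entryB (aug : List (List Int)) (mask c : Nat) : Int := entryAux aug mask 0 c 0

-- 'for r in range(n): if r != ri and vals[r]: comb[r] ^= piv'
def elimB (n ri piv : Nat) (vals : List Int) (comb : List Nat) : List Nat :=
  (List.range n).foldl (fun comb r =>
    if r ≠ ri ∧ vals.getD r 0 ≠ 0 then comb.set r ((comb.getD r 0) ^^^ piv) else comb) comb

-- one iteration of 'for col in range(m)'
def colStepB (aug : List (List Int)) (n : Nat) (st : List Nat × Nat × List Nat) (col : Nat) :
    List Nat × Nat × List Nat :=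
  let vals := st.1.map (fun mask => entryB aug mask col)
  match (List.range' st.2.1 (n - st.2.1)).find? (fun r => decide (vals.getD r 0 ≠ 0)) with
  | none => st
  | some pv =>
    let comb := (st.1.set st.2.1 (st.1.getD pv 0)).set pv (st.1.getD st.2.1 0)
    let vals := (vals.set st.2.1 (vals.getD pv 0)).set pv (vals.getD st.2.1 0)
    (elimB n st.2.1 (comb.getD st.2.1 0) vals comb, st.2.1 + 1, st.2.2 ++ [col])

def gf2_solve_alt (M : List (List Int)) (target : Int) : Option (List Int) × Int :=
  let n := M.length
  let m := match M with | [] => 0 | r :: _ => r.length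
  let aug := (PySem.List.enumerate M 0).map (fun p => p.2 ++ [pyBit target p.1.toNat])
  let comb0 := (List.range n).map (fun i => 1 <<< i)
  let st := (List.range m).foldl (colStepB aug n) (comb0, 0, [])
  let rank := st.2.2.length
  if (List.range' rank (n - rank)).any (fun r => decide (entryB aug (st.1.getD r 0) m ≠ 0)) then
    (none, (rank : Int))
  else
    (some ((PySem.List.enumerate st.2.2 0).foldl
        (fun sol p => sol.set p.2 (entryB aug (st.1.getD p.1.toNat 0) m))
        (List.replicate m (0 : Int))), (rank : Int))

-- ===== PRECONDITION & SPEC =====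
-- Pre_ excludes matrices with a row SHORTER than the first row: on those A normally raises
-- IndexError reading the missing entry (and returns only via its early inconsistency exit,
-- e.g. the cite in claim.json, where B raises). Rows longer than the first are admitted:
-- A returns normally on them and B matches it exactly.
def Pre_gf2_solve (M : List (List Int)) (target : Int) : Prop :=
  ∀ row ∈ M, (M.headD []).length ≤ row.length
instance (M : List (List Int)) (target : Int) : Decidable (Pre_gf2_solve M target) := by
  unfold Pre_gf2_solve; infer_instance
def pvWitness_gf2_solve : List (List Int) × Int := ([[1, 0], [0, 1]], 2)
def Spec_gf2_solve (M : List (List Int)) (target : Int) (out : Option (List Int) × Int) : Prop := out = gf2_solve_alt M target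
instance (M : List (List Int)) (target : Int) (out : Option (List Int) × Int) : Decidable (Spec_gf2_solve M target out) := by unfold Spec_gf2_solve; infer_instance

-- ===== CLAIM (what is proved, stated in full; the proofs are below) =====
def Claim_equal_gf2_solve : Prop := ∀ (M : List (List Int)) (target : Int), Dom_gf2_solve M target → Pre_gf2_solve M target → Spec_gf2_solve M target (gf2_solve M target)

-- ===== LEMMAS AND PROOFS =====

-- Python-int XOR algebra via the (sign, magnitude) representation -------------

def mkI (s : Bool) (m : Nat) : Int := if s then -(m:Int)-1 else (m:Int)

lemma bxor_mk (s1 s2 : Bool) (m1 m2 : Nat) :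
    PySem.Int.bxor (mkI s1 m1) (mkI s2 m2) = mkI (xor s1 s2) (m1 ^^^ m2) := by
  have hm1 : (0:Int) ≤ (m1:Int) := Int.natCast_nonneg m1
  have hm2 : (0:Int) ≤ (m2:Int) := Int.natCast_nonneg m2
  have hneg : ∀ k : Nat, ¬ (0:Int) ≤ -(k:Int)-1 := by intro k; omega
  cases s1 <;> cases s2
  · show PySem.Int.bxor (m1:Int) (m2:Int) = ((m1 ^^^ m2 : Nat) : Int)
    simp
  · show PySem.Int.bxor (m1:Int) (-(m2:Int)-1) = -((m1 ^^^ m2 : Nat):Int)-1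
    unfold PySem.Int.bxor
    rw [if_pos hm1, if_neg (hneg m2), show (-(-(m2:Int)-1)-1) = (m2:Int) by ring,
      Int.toNat_natCast, Int.toNat_natCast]
  · show PySem.Int.bxor (-(m1:Int)-1) (m2:Int) = -((m1 ^^^ m2 : Nat):Int)-1
    unfold PySem.Int.bxor
    rw [if_neg (hneg m1), if_pos hm2, show (-(-(m1:Int)-1)-1) = (m1:Int) by ring,
      Int.toNat_natCast, Int.toNat_natCast]
  · show PySem.Int.bxor (-(m1:Int)-1) (-(m2:Int)-1) = ((m1 ^^^ m2 : Nat):Int)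
    unfold PySem.Int.bxor
    rw [if_neg (hneg m1), if_neg (hneg m2), show (-(-(m1:Int)-1)-1) = (m1:Int) by ring,
      show (-(-(m2:Int)-1)-1) = (m2:Int) by ring, Int.toNat_natCast, Int.toNat_natCast]

lemma toMk (a : Int) : ∃ s m, a = mkI s m := by
  by_cases h : 0 ≤ a
  · exact ⟨false, a.toNat, by simp [mkI]; omega⟩
  · exact ⟨true, (-a-1).toNat, by simp [mkI]; omega⟩

lemma bxor_assoc (a b c : Int) :
    PySem.Int.bxor (PySem.Int.bxor a b) c = PySem.Int.bxor a (PySem.Int.bxor b c) := by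
  obtain ⟨s1, m1, rfl⟩ := toMk a
  obtain ⟨s2, m2, rfl⟩ := toMk b
  obtain ⟨s3, m3, rfl⟩ := toMk c
  rw [bxor_mk, bxor_mk, bxor_mk, bxor_mk, Bool.xor_assoc, Nat.xor_assoc]

lemma bxor_zero_left (a : Int) : PySem.Int.bxor 0 a = a := by
  rw [PySem.Int.bxor_comm]; simp

lemma entryAux_zero (aug : List (List Int)) (i c : Nat) (v : Int) :
    entryAux aug 0 i c v = v := by
  rw [entryAux]
  simp

lemma entryAux_ne (aug : List (List Int)) (mask i c : Nat) (v : Int) (h : mask ≠ 0) :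
    entryAux aug mask i c v = entryAux aug (mask >>> 1) (i+1) c
      (if mask &&& 1 = 1 then PySem.Int.bxor v ((aug.getD i []).getD c 0) else v) := by
  conv_lhs => rw [entryAux]
  simp [h]

-- entryAux: accumulator extraction, one-step unfolding, linearity, singleton --

lemma entryAux_acc (aug : List (List Int)) (c : Nat) :
    ∀ mask i (v : Int), entryAux aug mask i c v = PySem.Int.bxor v (entryAux aug mask i c 0) := by
  intro mask
  induction mask using Nat.strong_induction_on with
  | _ mask ih =>
    intro i v
    by_cases h : mask = 0
    · subst h
      rw [entryAux_zero, entryAux_zero]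
      simp
    · have hlt : mask >>> 1 < mask := by rw [Nat.shiftRight_one]; omega
      rw [entryAux_ne _ _ _ _ _ h, entryAux_ne _ _ _ _ _ h]
      by_cases hb : mask &&& 1 = 1
      · simp only [hb, if_true]
        rw [ih _ hlt (i+1) (PySem.Int.bxor v ((aug.getD i []).getD c 0)),
            ih _ hlt (i+1) (PySem.Int.bxor 0 ((aug.getD i []).getD c 0)),
            bxor_zero_left, bxor_assoc]
      · simp only [hb, if_false]
        rw [ih _ hlt (i+1) v]

lemma entryAux_step (aug : List (List Int)) (mask i c : Nat) :
    entryAux aug mask i c 0 =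
      PySem.Int.bxor (if mask &&& 1 = 1 then (aug.getD i []).getD c 0 else 0)
        (entryAux aug (mask >>> 1) (i+1) c 0) := by
  by_cases h : mask = 0
  · subst h
    rw [entryAux_zero]
    norm_num
    rw [entryAux_zero, bxor_zero_left]
  · rw [entryAux_ne _ _ _ _ _ h, entryAux_acc]
    congr 1
    by_cases hb : mask &&& 1 = 1 <;> simp [hb, bxor_zero_left]

lemma entryAux_linear (aug : List (List Int)) (c : Nat) :
    ∀ a b i, entryAux aug (a ^^^ b) i c 0 =
      PySem.Int.bxor (entryAux aug a i c 0) (entryAux aug b i c 0) := by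
  intro a
  induction a using Nat.strong_induction_on with
  | _ a ih =>
    intro b i
    by_cases ha : a = 0
    · subst ha
      rw [Nat.zero_xor, entryAux_zero, bxor_zero_left]
    · have hlt : a >>> 1 < a := by rw [Nat.shiftRight_one]; omega
      rw [entryAux_step aug (a ^^^ b), entryAux_step aug a, entryAux_step aug b,
          Nat.shiftRight_xor_distrib, ih _ hlt (b >>> 1) (i+1)]
      set x := (aug.getD i []).getD c 0
      set Ea := entryAux aug (a >>> 1) (i+1) c 0
      set Eb := entryAux aug (b >>> 1) (i+1) c 0
      have hbit : (a ^^^ b) &&& 1 = (a &&& 1) ^^^ (b &&& 1) := Nat.and_xor_distrib_right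
      by_cases hba : a &&& 1 = 1 <;> by_cases hbb : b &&& 1 = 1
      · rw [if_pos hba, if_pos hbb, if_neg (by simp [hbit, hba, hbb])]
        rw [bxor_zero_left, PySem.Int.bxor_comm x Ea, bxor_assoc Ea x (PySem.Int.bxor x Eb),
            ← bxor_assoc x x Eb, PySem.Int.bxor_self, bxor_zero_left]
      · have hb0 : b &&& 1 = 0 := by rw [Nat.and_one_is_mod] at hbb ⊢; omega
        rw [if_pos hba, if_neg hbb, if_pos (by simp [hbit, hba, hb0])]
        rw [bxor_zero_left, bxor_assoc]
      · have ha0 : a &&& 1 = 0 := by rw [Nat.and_one_is_mod] at hba ⊢; omega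
        rw [if_neg hba, if_pos hbb, if_pos (by simp [hbit, ha0, hbb])]
        rw [bxor_zero_left, ← bxor_assoc, PySem.Int.bxor_comm x Ea, bxor_assoc]
      · have ha0 : a &&& 1 = 0 := by rw [Nat.and_one_is_mod] at hba ⊢; omega
        have hb0 : b &&& 1 = 0 := by rw [Nat.and_one_is_mod] at hbb ⊢; omega
        rw [if_neg hba, if_neg hbb, if_neg (by simp [hbit, ha0, hb0])]
        rw [bxor_zero_left, bxor_zero_left, bxor_zero_left]

lemma entryB_xor (aug : List (List Int)) (a b c : Nat) :
    entryB aug (a ^^^ b) c = PySem.Int.bxor (entryB aug a c) (entryB aug b c) :=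
  entryAux_linear aug c a b 0

lemma entryAux_pow (aug : List (List Int)) (c : Nat) :
    ∀ r i, entryAux aug (1 <<< r) i c 0 = (aug.getD (i+r) []).getD c 0 := by
  intro r
  induction r with
  | zero =>
    intro i
    rw [show (1:Nat) <<< 0 = 1 from rfl, entryAux_ne _ _ _ _ _ one_ne_zero]
    norm_num
    rw [show (1:Nat) >>> 1 = 0 from rfl, entryAux_zero, bxor_zero_left]
  | succ r ihr =>
    intro i
    have h1 : (1 <<< (r+1)) = 2 * (1 <<< r) := by
      simp [Nat.shiftLeft_eq]; ring
    have hne : (1 <<< (r+1)) ≠ 0 := by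
      rw [h1, Nat.shiftLeft_eq]
      positivity
    rw [entryAux_ne _ _ _ _ _ hne]
    rw [show (1 <<< (r+1)) &&& 1 = 0 by rw [Nat.and_one_is_mod, h1, Nat.mul_mod_right]]
    rw [show (1 <<< (r+1)) >>> 1 = 1 <<< r by
      rw [Nat.shiftRight_one, h1, Nat.mul_div_cancel_left _ two_pos]]
    norm_num
    rw [ihr (i+1), show i + 1 + r = i + (r+1) from by omega]
    rfl

lemma entryB_single (aug : List (List Int)) (r c : Nat) :
    entryB aug (1 <<< r) c = (aug.getD r []).getD c 0 := by
  rw [entryB, entryAux_pow]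
  norm_num

-- list helpers ----------------------------------------------------------------

lemma getD_set' {α : Type} (l : List α) (i j : Nat) (v d : α) :
    (l.set i v).getD j d = if j = i ∧ i < l.length then v else l.getD j d := by
  by_cases hj : j = i
  · subst hj
    by_cases hi : j < l.length
    · rw [if_pos ⟨rfl, hi⟩, List.getD_eq_getElem?_getD, List.getElem?_set_self hi]
      rfl
    · rw [if_neg (by omega), List.set_eq_of_length_le (by omega)]
  · rw [if_neg (by tauto), List.getD_eq_getElem?_getD, List.getElem?_set_ne (by omega),
      ← List.getD_eq_getElem?_getD]

lemma getD_swap {α : Type} (l : List α) (i k r : Nat) (d : α) (hi : i < l.length) (hk : k < l.length) :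
    ((l.set i (l.getD k d)).set k (l.getD i d)).getD r d =
      if r = k then l.getD i d else if r = i then l.getD k d else l.getD r d := by
  rw [getD_set', getD_set']
  by_cases h1 : r = k
  · rw [if_pos ⟨h1, by simpa using hk⟩, if_pos h1]
  · rw [if_neg (by tauto), if_neg h1]
    by_cases h2 : r = i
    · rw [if_pos ⟨h2, hi⟩, if_pos h2]
    · rw [if_neg (by tauto), if_neg h2]

lemma length_foldl_set {α : Type} (g : Nat → α → α) (d : α) :
    ∀ (l : List Nat) (r : List α),
      (l.foldl (fun row c => row.set c (g c (row.getD c d))) r).length = r.length := by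
  intro l
  induction l with
  | nil => intro r; rfl
  | cons c t ih => intro r; rw [List.foldl_cons, ih, List.length_set]

lemma getD_foldl_set_range' {α : Type} (g : Nat → α → α) (d : α) :
    ∀ (s k : Nat) (r : List α) (j : Nat),
      ((List.range' k s).foldl (fun row c => row.set c (g c (row.getD c d))) r).getD j d =
        if k ≤ j ∧ j < k + s ∧ j < r.length then g j (r.getD j d) else r.getD j d := by
  intro s
  induction s with
  | zero =>
    intro k r j
    rw [if_neg (by omega)]
    rfl
  | succ s ih =>
    intro k r j
    rw [List.range'_succ, List.foldl_cons, ih]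
    rw [List.length_set]
    by_cases hcase : k + 1 ≤ j ∧ j < k + 1 + s ∧ j < r.length
    · rw [if_pos hcase, if_pos (by omega)]
      rw [getD_set' _ _ _ _ _, if_neg (by omega)]
    · rw [if_neg hcase]
      rw [getD_set' _ _ _ _ _]
      by_cases hk : j = k ∧ k < r.length
      · rw [if_pos hk, if_pos (by omega)]
        rw [hk.1]
      · rw [if_neg hk, if_neg (by omega)]

lemma find?_congr_mem {α : Type} (l : List α) (p q : α → Bool) (h : ∀ x ∈ l, p x = q x) :
    l.find? p = l.find? q := by
  induction l with
  | nil => rfl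
  | cons a t ih =>
    rw [List.find?_cons, List.find?_cons, h a (List.mem_cons_self)]
    cases hqa : q a
    · exact ih (fun x hx => h x (List.mem_cons_of_mem _ hx))
    · rfl

-- relation between the two states ---------------------------------------------

def RowRel (aug0 : List (List Int)) (m : Nat) (row : List Int) (mask : Nat) : Prop :=
  m + 1 ≤ row.length ∧ ∀ c, c ≤ m → row.getD c 0 = entryB aug0 mask c

def StRel (aug0 : List (List Int)) (n m : Nat)
    (sa : List (List Int) × Nat × List Nat) (sb : List Nat × Nat × List Nat) : Prop :=
  sa.1.length = n ∧ sb.1.length = n ∧ sb.2.1 = sa.2.1 ∧ sb.2.2 = sa.2.2 ∧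
  sa.2.1 = sa.2.2.length ∧ sa.2.1 ≤ n ∧
  ∀ r, r < n → RowRel aug0 m (sa.1.getD r []) (sb.1.getD r 0)

lemma rowRel_xor {aug0 : List (List Int)} {m : Nat} {q r : List Int} {p s : Nat}
    (hq : RowRel aug0 m q p) (hr : RowRel aug0 m r s) :
    RowRel aug0 m (pyXorRow m q r) (s ^^^ p) := by
  obtain ⟨hql, hqe⟩ := hq
  obtain ⟨hrl, hre⟩ := hr
  unfold pyXorRow
  rw [List.range_eq_range']
  constructor
  · rw [length_foldl_set (g := fun c v => PySem.Int.bxor v (q.getD c 0)) (d := 0)]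
    exact hrl
  · intro c hc
    rw [getD_foldl_set_range' (g := fun c v => PySem.Int.bxor v (q.getD c 0)) (d := 0)]
    rw [if_pos ⟨Nat.zero_le _, by omega, by omega⟩]
    rw [hre c hc, hqe c hc, ← entryB_xor]

lemma rowRel_entry_iff {aug0 : List (List Int)} {m c : Nat} {row : List Int} {mask : Nat}
    (h : RowRel aug0 m row mask) (hc : c ≤ m) :
    (row.getD c 0 ≠ 0) ↔ entryB aug0 mask c ≠ 0 := by
  rw [h.2 c hc]

-- the two elimination folds, stepped together: A reads the live matrix, B reads the
-- frozen 'vals'; rows at indices not yet visited are still the post-swap rows,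
-- and row ri is never modified, so the guards agree step by step.
lemma elim_rel {aug0 : List (List Int)} {n m ri col : Nat} (hri : ri < n)
    {aug : List (List Int)} {comb : List Nat} {vals : List Int}
    (ha : aug.length = n) (hb : comb.length = n)
    (hrel : ∀ r, r < n → RowRel aug0 m (aug.getD r []) (comb.getD r 0))
    (hvals : ∀ r, r < n → vals.getD r 0 = (aug.getD r []).getD col 0) :
    (elimA n m ri col aug).length = n ∧
    (elimB n ri (comb.getD ri 0) vals comb).length = n ∧
    ∀ r, r < n → RowRel aug0 m ((elimA n m ri col aug).getD r [])
      ((elimB n ri (comb.getD ri 0) vals comb).getD r 0) := by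
  have hq0 : RowRel aug0 m (aug.getD ri []) (comb.getD ri 0) := hrel ri hri
  have haux : ∀ (s k : Nat), k + s = n →
      ∀ (aug' : List (List Int)) (comb' : List Nat),
        aug'.length = n → comb'.length = n →
        (∀ r, r < n → RowRel aug0 m (aug'.getD r []) (comb'.getD r 0)) →
        (∀ r, k ≤ r → r < n → aug'.getD r [] = aug.getD r []) →
        aug'.getD ri [] = aug.getD ri [] →
        ((List.range' k s).foldl (fun aug r =>
            if r ≠ ri ∧ (aug.getD r []).getD col 0 ≠ 0 then
              aug.set r (pyXorRow m (aug.getD ri []) (aug.getD r []))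
            else aug) aug').length = n ∧
        ((List.range' k s).foldl (fun comb' r =>
            if r ≠ ri ∧ vals.getD r 0 ≠ 0 then
              comb'.set r ((comb'.getD r 0) ^^^ (comb.getD ri 0)) else comb') comb').length = n ∧
        (∀ r, r < n → RowRel aug0 m
          (((List.range' k s).foldl (fun aug r =>
            if r ≠ ri ∧ (aug.getD r []).getD col 0 ≠ 0 then
              aug.set r (pyXorRow m (aug.getD ri []) (aug.getD r []))
            else aug) aug').getD r [])
          (((List.range' k s).foldl (fun comb' r =>
            if r ≠ ri ∧ vals.getD r 0 ≠ 0 then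
              comb'.set r ((comb'.getD r 0) ^^^ (comb.getD ri 0)) else comb') comb').getD r 0)) := by
    intro s
    induction s with
    | zero =>
      intro k _ aug' comb' hal hcl hptw _ _
      exact ⟨hal, hcl, hptw⟩
    | succ s ih =>
      intro k hk aug' comb' hal hcl hptw hfresh hfixri
      rw [List.range'_succ]
      simp only [List.foldl_cons]
      have hkn : k < n := by omega
      have hguard : (k ≠ ri ∧ (aug'.getD k []).getD col 0 ≠ 0) ↔
          (k ≠ ri ∧ vals.getD k 0 ≠ 0) := by
        rw [hvals k hkn, hfresh k (le_refl k) hkn]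
      by_cases hg : k ≠ ri ∧ (aug'.getD k []).getD col 0 ≠ 0
      · rw [if_pos hg, if_pos (hguard.mp hg)]
        apply ih (k+1) (by omega)
        · rw [List.length_set]; exact hal
        · rw [List.length_set]; exact hcl
        · intro r hr
          rw [getD_set', getD_set']
          by_cases he : r = k
          · rw [if_pos ⟨he, by omega⟩, if_pos ⟨he, by omega⟩]
            rw [hfixri]
            exact rowRel_xor hq0 (hptw k hkn)
          · rw [if_neg (by tauto), if_neg (by tauto)]
            exact hptw r hr
        · intro r hr hrn
          rw [getD_set', if_neg (by omega)]
          exact hfresh r (by omega) hrn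
        · rw [getD_set', if_neg (by intro hc'; exact hg.1 hc'.1.symm)]
          exact hfixri
      · rw [if_neg hg, if_neg (fun hb' => hg (hguard.mpr hb'))]
        exact ih (k+1) (by omega) aug' comb' hal hcl hptw
          (fun r hr hrn => hfresh r (by omega) hrn) hfixri
  have hres := haux n 0 (by omega) aug comb ha hb hrel (fun r _ _ => rfl) rfl
  unfold elimA elimB
  rw [List.range_eq_range']
  exact hres

lemma colStep_rel {aug0 : List (List Int)} {n m col : Nat} (hcol : col ≤ m)
    {sa : List (List Int) × Nat × List Nat} {sb : List Nat × Nat × List Nat}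
    (h : StRel aug0 n m sa sb) : StRel aug0 n m (colStepA n m sa col) (colStepB aug0 n sb col) := by
  obtain ⟨A1, A2, A3⟩ := sa
  obtain ⟨B1, B2, B3⟩ := sb
  obtain ⟨hL1, hL2, hri, hpiv, hlen, hle, hpt⟩ := h
  dsimp only at hL1 hL2 hri hpiv hlen hle hpt
  subst B2 B3
  have hvals0 : ∀ r, r < n →
      (B1.map (fun mask => entryB aug0 mask col)).getD r 0 = (A1.getD r []).getD col 0 := by
    intro r hrn
    have hB : B1[r]? = some (B1.getD r 0) := by
      rw [List.getElem?_eq_getElem (by omega), List.getD_eq_getElem _ _ (by omega)]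
    rw [List.getD_eq_getElem?_getD, List.getElem?_map, hB]
    simp only [Option.map_some, Option.getD_some]
    exact ((hpt r hrn).2 col hcol).symm
  have hfind : (List.range' A2 (n - A2)).find?
        (fun r => decide ((B1.map (fun mask => entryB aug0 mask col)).getD r 0 ≠ 0)) =
      (List.range' A2 (n - A2)).find? (fun r => decide ((A1.getD r []).getD col 0 ≠ 0)) := by
    apply find?_congr_mem
    intro r hr
    have hrn : r < n := by
      have := List.mem_range'_1.mp hr
      omega
    rw [decide_eq_decide, hvals0 r hrn]
  unfold colStepA colStepB
  dsimp only
  rw [hfind]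
  cases hf : (List.range' A2 (n - A2)).find? (fun r => decide ((A1.getD r []).getD col 0 ≠ 0)) with
  | none => exact ⟨hL1, hL2, rfl, rfl, hlen, hle, hpt⟩
  | some pv =>
    dsimp only
    have hpvmem := List.mem_of_find?_eq_some hf
    have hpvb := List.mem_range'_1.mp hpvmem
    have hpvn : pv < n := by omega
    have hrin : A2 < n := by omega
    set vals := B1.map (fun mask => entryB aug0 mask col) with hvals_def
    have hvlen : vals.length = n := by rw [hvals_def, List.length_map, hL2]
    have hswL1 : ((A1.set A2 (A1.getD pv [])).set pv (A1.getD A2 [])).length = n := by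
      simp [hL1]
    have hswL2 : ((B1.set A2 (B1.getD pv 0)).set pv (B1.getD A2 0)).length = n := by
      simp [hL2]
    have hswpt : ∀ r, r < n → RowRel aug0 m
        (((A1.set A2 (A1.getD pv [])).set pv (A1.getD A2 [])).getD r [])
        (((B1.set A2 (B1.getD pv 0)).set pv (B1.getD A2 0)).getD r 0) := by
      intro r hr
      rw [getD_swap A1 A2 pv r [] (by omega) (by omega),
          getD_swap B1 A2 pv r 0 (by omega) (by omega)]
      by_cases h1 : r = pv
      · rw [if_pos h1, if_pos h1]
        exact hpt A2 hrin
      · rw [if_neg h1, if_neg h1]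
        by_cases h2 : r = A2
        · rw [if_pos h2, if_pos h2]
          exact hpt pv hpvn
        · rw [if_neg h2, if_neg h2]
          exact hpt r hr
    have hswvals : ∀ r, r < n →
        ((vals.set A2 (vals.getD pv 0)).set pv (vals.getD A2 0)).getD r 0 =
          ((((A1.set A2 (A1.getD pv [])).set pv (A1.getD A2 []))).getD r []).getD col 0 := by
      intro r hr
      rw [getD_swap vals A2 pv r 0 (by omega) (by omega),
          getD_swap A1 A2 pv r [] (by omega) (by omega)]
      by_cases h1 : r = pv
      · rw [if_pos h1, if_pos h1, hvals0 A2 hrin]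
      · rw [if_neg h1, if_neg h1]
        by_cases h2 : r = A2
        · rw [if_pos h2, if_pos h2, hvals0 pv hpvn]
        · rw [if_neg h2, if_neg h2, hvals0 r hr]
    have helim := elim_rel hrin
      (aug0 := aug0)
      (aug := (A1.set A2 (A1.getD pv [])).set pv (A1.getD A2 []))
      (comb := (B1.set A2 (B1.getD pv 0)).set pv (B1.getD A2 0))
      (vals := (vals.set A2 (vals.getD pv 0)).set pv (vals.getD A2 0))
      hswL1 hswL2 hswpt hswvals
    exact ⟨helim.1, helim.2.1, rfl, rfl, by dsimp only; simp [hlen], by dsimp only; omega, helim.2.2⟩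

lemma fold_rel {aug0 : List (List Int)} {n m : Nat} :
    ∀ (cols : List Nat), (∀ c ∈ cols, c ≤ m) →
    ∀ {sa : List (List Int) × Nat × List Nat} {sb : List Nat × Nat × List Nat},
      StRel aug0 n m sa sb →
      StRel aug0 n m (cols.foldl (colStepA n m) sa) (cols.foldl (colStepB aug0 n) sb) := by
  intro cols
  induction cols with
  | nil => intro _ sa sb h; exact h
  | cons c t ih =>
    intro hc sa sb h
    simp only [List.foldl_cons]
    exact ih (fun x hx => hc x (List.mem_cons_of_mem _ hx)) (colStep_rel (hc c List.mem_cons_self) h)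

lemma augB_eq_augA (M : List (List Int)) (target : Int) :
    (PySem.List.enumerate M 0).map (fun p => p.2 ++ [pyBit target p.1.toNat]) =
      (List.range M.length).map (fun i => M.getD i [] ++ [pyBit target i]) := by
  apply List.ext_getElem
  · simp [PySem.List.length_enumerate]
  · intro i h1 h2
    have hi : i < M.length := by simpa [PySem.List.length_enumerate] using h1
    rw [List.getElem_map, List.getElem_map, PySem.List.getElem_enumerate, List.getElem_range]
    dsimp only
    congr 1
    · rw [List.getD_eq_getElem M [] hi]
    · rw [show ((0:Int) + (i:Int)).toNat = i from by omega]

lemma main_equiv (M : List (List Int)) (target : Int) (hpre : Pre_gf2_solve M target) :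
    gf2_solve M target = gf2_solve_alt M target := by
  simp only [gf2_solve, gf2_solve_alt]
  rw [augB_eq_augA]
  set n := M.length with hn
  set m := (match M with | [] => 0 | r :: _ => r.length) with hm
  set aug0 := (List.range n).map (fun i => M.getD i [] ++ [pyBit target i]) with haug0
  have hmlen : ∀ row ∈ M, m ≤ row.length := by
    intro row hrow
    have h1 := hpre row hrow
    cases M with
    | nil => simp at hrow
    | cons a t => simpa [hm] using h1
  have hinit : StRel aug0 n m (aug0, 0, []) ((List.range n).map (fun i => 1 <<< i), 0, ([]:List Nat)) := by
    refine ⟨by simp [haug0], by simp, rfl, rfl, rfl, by dsimp only; exact Nat.zero_le n, ?_⟩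
    intro r hr
    dsimp only
    rw [haug0, PySem.List.getD_map_range _ _ _ _ hr, PySem.List.getD_map_range _ _ _ _ hr]
    have hmem : M.getD r [] ∈ M := by
      rw [List.getD_eq_getElem M [] (by omega)]
      exact List.getElem_mem (by omega)
    have hlenr : m ≤ (M.getD r []).length := hmlen _ hmem
    constructor
    · simp only [List.length_append, List.length_cons, List.length_nil]
      omega
    · intro c hc
      rw [entryB_single, ← haug0]
      rw [haug0, PySem.List.getD_map_range _ _ _ _ hr]
  have hrel := fold_rel (aug0 := aug0) (n := n) (m := m) (List.range m)
    (fun c hc => Nat.le_of_lt (List.mem_range.mp hc)) hinit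
  obtain ⟨hL1, hL2, hri, hpiv, hlen, hle, hpt⟩ := hrel
  rw [hpiv]
  have hcons : ((List.range' ((List.range m).foldl (colStepA n m) (aug0, 0, [])).2.2.length
        (n - ((List.range m).foldl (colStepA n m) (aug0, 0, [])).2.2.length)).any
        (fun r => decide ((((List.range m).foldl (colStepA n m) (aug0, 0, [])).1.getD r []).getD m 0 ≠ 0)))
      = ((List.range' ((List.range m).foldl (colStepA n m) (aug0, 0, [])).2.2.length
        (n - ((List.range m).foldl (colStepA n m) (aug0, 0, [])).2.2.length)).any
        (fun r => decide (entryB aug0 (((List.range m).foldl (colStepB aug0 n)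
          ((List.range n).map (fun i => 1 <<< i), 0, [])).1.getD r 0) m ≠ 0))) := by
    apply PySem.List.any_congr_mem
    intro r hr
    have hrb := List.mem_range'_1.mp hr
    have hrn : r < n := by omega
    rw [decide_eq_decide]
    exact rowRel_entry_iff (hpt r hrn) (le_refl m)
  rw [hcons]
  by_cases hc : ((List.range' ((List.range m).foldl (colStepA n m) (aug0, 0, [])).2.2.length
        (n - ((List.range m).foldl (colStepA n m) (aug0, 0, [])).2.2.length)).any
        (fun r => decide (entryB aug0 (((List.range m).foldl (colStepB aug0 n)
          ((List.range n).map (fun i => 1 <<< i), 0, [])).1.getD r 0) m ≠ 0))) = true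
  · rw [if_pos hc, if_pos hc]
  · rw [if_neg hc, if_neg hc]
    refine Prod.ext ?_ rfl
    dsimp only
    congr 1
    apply PySem.List.foldl_congr_mem
    intro acc x hx
    obtain ⟨k, hk, hxeq⟩ := (PySem.List.mem_enumerate_iff _ _ _).mp hx
    subst hxeq
    have hkn : k < n := by omega
    have hval := (hpt k hkn).2 m (le_refl m)
    dsimp only
    rw [show ((0 : Int) + (k:Int)).toNat = k by omega, hval]

-- ===== VERDICT (by name: the statement is the Claim_ definition above) =====
theorem gf2_solve_spec : Claim_equal_gf2_solve := by
  unfold Claim_equal_gf2_solve Spec_gf2_solve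
  intro M target _hdom hpre
  exact main_equiv M target hpre
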